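-- pv_equiv track=rewrite | github.com/iossifovlab/gpf | dae/dae/tools/generate_configs.py | get_string_identifier
-- ===== SOURCE A (Python) =====
-- def get_string_identifier(string):
--     res = ""
--     for char in string:
--         if (char >= 'A' and char <= 'Z') or \
--            (char >= 'a' and char <= 'z') or \
--            (char == '_'):
--             res += char
--         else:
--             break
--     return res
-- ===== SOURCE B (Python) =====
-- def get_string_identifier(string):
--     # find the index of the first character outside [A-Za-z_]; slice up to it
--     bad = next((i for i, c in enumerate(string)
--                 if not (c.isascii() and c.isalpha() or c == '_')),
--                len(string))
--     return string[:bad]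
-- ===== Notes on version B (the rewrite author's own statement) =====
-- stated objective: alternative
-- what changed: Instead of A's accumulator loop that builds the result by repeated string concatenation, B first locates the index of the first non-identifier character (enumerate/next with an ASCII-alpha test) and then returns a single slice up to it, avoiding the per-character string rebuilds.
import Mathlib
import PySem

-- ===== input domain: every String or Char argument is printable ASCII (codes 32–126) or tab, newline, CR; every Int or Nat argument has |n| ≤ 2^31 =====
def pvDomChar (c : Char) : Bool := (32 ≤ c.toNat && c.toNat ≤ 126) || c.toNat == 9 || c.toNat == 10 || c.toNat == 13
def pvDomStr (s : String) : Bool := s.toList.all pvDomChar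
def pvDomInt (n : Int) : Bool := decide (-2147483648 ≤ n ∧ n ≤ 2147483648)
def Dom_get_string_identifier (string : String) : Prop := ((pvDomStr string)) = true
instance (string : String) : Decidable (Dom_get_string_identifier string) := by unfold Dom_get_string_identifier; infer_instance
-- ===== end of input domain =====

-- B locates the index of the first non-identifier character and returns one slice up to it,
-- instead of A's accumulator loop with repeated concatenation and break; alternative decomposition (measured constant-factor faster).

-- ===== PORT A =====
-- A's loop condition on one character
def pvIsIdentChar (c : Char) : Bool :=
  (('A' ≤ c && c ≤ 'Z') || ('a' ≤ c && c ≤ 'z') || (c == '_'))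

-- the for-loop with break: accumulate res until the first non-matching char
def pvLoopA : List Char → List Char → List Char
  | [], res => res
  | c :: cs, res => if pvIsIdentChar c then pvLoopA cs (res ++ [c]) else res

def get_string_identifier (string : String) : String :=
  String.mk (pvLoopA string.toList [])

-- ===== PORT B =====
-- B's per-character test: c.isascii() and c.isalpha() or c == '_'
-- (Lean's Char.isAlpha is exactly the ASCII letter test, matching isascii+isalpha on any input)
def pvIsBadChar (c : Char) : Bool := !(c.isAlpha || c == '_')

-- index of the first non-identifier character, defaulting to the length (the next(..., len(s)) call)
def pvBadIdx (cs : List Char) : Nat := (cs.findIdx? pvIsBadChar).getD cs.length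

-- string[:bad] : slice up to that index
def get_string_identifier_alt (string : String) : String :=
  String.mk (string.toList.take (pvBadIdx string.toList))

-- ===== PRECONDITION & SPEC =====
def Spec_get_string_identifier (string : String) (out : String) : Prop := out = get_string_identifier_alt string
instance (string : String) (out : String) : Decidable (Spec_get_string_identifier string out) := by unfold Spec_get_string_identifier; infer_instance

-- ===== CLAIM (what is proved, stated in full; the proofs are below) =====
def Claim_equal_get_string_identifier : Prop := ∀ (string : String), Dom_get_string_identifier string → Spec_get_string_identifier string (get_string_identifier string)

-- ===== LEMMAS AND PROOFS =====
theorem pvIdent_not_bad (c : Char) : pvIsIdentChar c = !(pvIsBadChar c) := by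
  unfold pvIsIdentChar pvIsBadChar
  cases h1 : ('A' ≤ c && c ≤ 'Z') <;> cases h2 : ('a' ≤ c && c ≤ 'z') <;> cases h3 : (c == '_') <;>
    simp_all [Char.isAlpha, Char.isUpper, Char.isLower, Char.le_def]

theorem pvLoopA_eq (cs res : List Char) :
    pvLoopA cs res = res ++ cs.take (pvBadIdx cs) := by
  induction cs generalizing res with
  | nil => simp [pvLoopA, pvBadIdx]
  | cons c cs ih =>
    simp only [pvLoopA, pvBadIdx, List.findIdx?_cons]
    by_cases h : pvIsIdentChar c = true
    · have hb : pvIsBadChar c = false := by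
        have := pvIdent_not_bad c; rw [h] at this; simpa using this.symm
      cases hfi : cs.findIdx? pvIsBadChar <;>
        simp [h, hb, ih, pvBadIdx, hfi, List.take_succ_cons]
    · have hb : pvIsBadChar c = true := by
        have := pvIdent_not_bad c
        cases hb : pvIsBadChar c
        · rw [hb] at this; simp at this; exact absurd this h
        · rfl
      simp [h, hb]

-- ===== VERDICT (by name: the statement is the Claim_ definition above) =====
theorem get_string_identifier_spec : Claim_equal_get_string_identifier := by
  intro s _
  unfold Spec_get_string_identifier get_string_identifier get_string_identifier_alt
  simp [pvLoopA_eq]
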